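-- pv_equiv track=rewrite | github.com/Nic-Moy/CSCI-570-Semester-Project | CSCI570_Project_Minimum_V1/SampleTestCases/basic_3.py | basic_solution
-- ===== SOURCE A (Python) =====
-- letter_to_idx = {'A': 0, 'C': 1, 'G': 2, 'T': 3}
--
-- values_table = [
--     [0, 110, 48, 94],  # row 0 = A
--     [110, 0, 118, 48],  # row 1 = C
--     [48, 118, 0, 110],  # row 2 = G
--     [94, 48, 110, 0]]  # row 3 = T
--
-- gap_penalty = 30
--
-- def basic_solution(sequence1, sequence2):
--     m = len(sequence1)
--     n = len(sequence2)
--     opt = [[0]*(n+1) for _ in range(m+1)]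
--
--     #Initialize column 0 and row 0
--     for x in range(1, m+1):
--         opt[x][0] = x * gap_penalty
--     for y in range(1, n+1):
--         opt[0][y] = y * gap_penalty
--
--
--     for i in range(1,m+1):
--         for j in range(1,n+1):
--             offset1 = letter_to_idx[sequence1[i-1]]
--             offset2 = letter_to_idx[sequence2[j-1]]
--
--             opt[i][j] = min(opt[i-1][j-1] + values_table[offset1][offset2],
--                             opt[i-1][j] + gap_penalty,
--                             opt[i][j-1] + gap_penalty)
--
--     i, j = m, n
--     align_X, align_Y = [], []
--     while i > 0 or j > 0:
--         # diag?
--         if i > 0 and j > 0: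
--             a = letter_to_idx[sequence1[i - 1]]
--             b = letter_to_idx[sequence2[j - 1]]
--             if opt[i][j] == opt[i - 1][j - 1] + values_table[a][b]:
--                 align_X.append(sequence1[i - 1])
--                 align_Y.append(sequence2[j - 1])
--                 i, j = i - 1, j - 1
--                 continue
--         # gap in X (left)
--         if j > 0 and opt[i][j] == opt[i][j - 1] + gap_penalty:
--             align_X.append('_')
--             align_Y.append(sequence2[j - 1])
--             j -= 1
--             continue
--         # gap in Y (up)
--         if i > 0 and opt[i][j] == opt[i - 1][j] + gap_penalty:
--             align_X.append(sequence1[i - 1])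
--             align_Y.append('_')
--             i -= 1
--             continue
--     aligned_X = ''.join(reversed(align_X))
--     aligned_Y = ''.join(reversed(align_Y))
--     return opt[m][n], aligned_X, aligned_Y
-- ===== SOURCE B (Python) =====
-- letter_to_idx = {'A': 0, 'C': 1, 'G': 2, 'T': 3}
--
-- values_table = [
--     [0, 110, 48, 94],
--     [110, 0, 118, 48],
--     [48, 118, 0, 110],
--     [94, 48, 110, 0]]
--
-- gap_penalty = 30
--
--
-- def basic_solution(sequence1, sequence2):
--     # Single forward pass, no traceback and no retained table: only one rolling
--     # row is kept, and each cell carries (score, xchain, ychain) where the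
--     # chains are immutable cons cells (char, tail) sharing tails, holding the
--     # alignment of the two prefixes (most recent move first).  Ties are broken
--     # diag > left > up, so the chain of the last cell IS the final alignment.
--     m, n = len(sequence1), len(sequence2)
--     row = [(0, None, None)]
--     for j in range(1, n + 1):
--         s, x, y = row[j - 1]
--         row.append((s + gap_penalty, ('_', x), (sequence2[j - 1], y)))
--     for i in range(1, m + 1):
--         prev = row
--         s0, x0, y0 = prev[0]
--         row = [(s0 + gap_penalty, (sequence1[i - 1], x0), ('_', y0))]
--         for j in range(1, n + 1):
--             c1 = letter_to_idx[sequence1[i - 1]]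
--             c2 = letter_to_idx[sequence2[j - 1]]
--             sd, xd, yd = prev[j - 1]
--             su, xu, yu = prev[j]
--             sl, xl, yl = row[j - 1]
--             d = sd + values_table[c1][c2]
--             u = su + gap_penalty
--             l = sl + gap_penalty
--             v = min(d, u, l)
--             if v == d:
--                 row.append((v, (sequence1[i - 1], xd), (sequence2[j - 1], yd)))
--             elif v == l:
--                 row.append((v, ('_', xl), (sequence2[j - 1], yl)))
--             else:
--                 row.append((v, (sequence1[i - 1], xu), ('_', yu)))
--     score, x, y = row[n]
--     X = []
--     while x is not None:
--         X.append(x[0])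
--         x = x[1]
--     Y = []
--     while y is not None:
--         Y.append(y[0])
--         y = y[1]
--     return score, ''.join(reversed(X)), ''.join(reversed(Y))
-- ===== Notes on version B (the rewrite author's own statement) =====
-- stated objective: alternative
-- what changed: B replaces A's two-phase fill-then-traceback (full (m+1)x(n+1) score table, then a backward loop re-testing score equalities) with a single forward pass that keeps only one rolling row whose cells carry (score, alignment-so-far) as shared immutable cons chains; the answer is read directly off the last cell, no table is retained and no traceback runs.
import Mathlib
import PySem

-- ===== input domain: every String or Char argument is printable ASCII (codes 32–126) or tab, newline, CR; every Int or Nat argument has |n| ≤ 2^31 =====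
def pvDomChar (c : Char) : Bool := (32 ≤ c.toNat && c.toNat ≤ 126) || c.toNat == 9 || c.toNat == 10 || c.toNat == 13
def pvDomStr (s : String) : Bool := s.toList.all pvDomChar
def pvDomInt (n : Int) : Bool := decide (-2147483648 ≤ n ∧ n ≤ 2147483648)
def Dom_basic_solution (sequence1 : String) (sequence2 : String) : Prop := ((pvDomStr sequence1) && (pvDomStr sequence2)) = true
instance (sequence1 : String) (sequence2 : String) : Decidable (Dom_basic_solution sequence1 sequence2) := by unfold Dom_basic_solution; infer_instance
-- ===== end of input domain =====

-- B replaces A's fill-then-traceback (full table + backward equality-retesting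
-- loop) by a single forward pass over a rolling row whose cells carry the
-- alignment so far as shared cons chains; same return value, alternative structure.

-- module constants of the Python file, shared by both programs
-- letter_to_idx lookup: exact on 'A','C','G','T' (the only letters admitted by
-- Pre_); on any other letter Python raises KeyError, which Pre_ excludes.
def pvIdx (c : Char) : Nat :=
  if c = 'A' then 0 else if c = 'C' then 1 else if c = 'G' then 2 else 3

def pvVT : List (List Int) :=
  [[0, 110, 48, 94], [110, 0, 118, 48], [48, 118, 0, 110], [94, 48, 110, 0]]

def pvCost (a b : Char) : Int := (pvVT.getD (pvIdx a) []).getD (pvIdx b) 0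

-- ===== PORT A =====
-- inner fill loop of A: given the char of row i, the remaining chars of
-- sequence2, the value to the left, and the previous row from column j-1 on,
-- produce the row values for columns j.. (the row-major assignment loop)
def pvRowA (c1 : Char) : List Char → Int → List Int → List Int
  | c2 :: rest, left, pd :: pu :: pt =>
      let v := min (pd + pvCost c1 c2) (min (pu + 30) (left + 30))
      v :: pvRowA c1 rest v (pu :: pt)
  | _, _, _ => []

-- outer fill loop: rows i = 1..m (each row starts with opt[i][0] = i*30)
def pvRowsA (cs2 : List Char) : List Char → List Int → Int → List (List Int)
  | [], _, _ => []
  | c1 :: rest, prev, i =>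
      let row := (i * 30) :: pvRowA c1 cs2 (i * 30) prev
      row :: pvRowsA cs2 rest row (i + 1)

def pvOptA (cs1 cs2 : List Char) : List (List Int) :=
  let row0 := (List.range (cs2.length + 1)).map (fun y => (y : Int) * 30)
  row0 :: pvRowsA cs2 cs1 row0 1

-- the traceback 'while i > 0 or j > 0' loop, fueled (fuel m+n suffices: each
-- iteration that fires a branch decreases i+j; chars are read with getD, exact
-- in range, and the accumulators are consed so the final reversal is built in
def pvTbA (cs1 cs2 : List Char) (opt : List (List Int)) :
    Nat → Nat → Nat → List Char × List Char → List Char × List Char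
  | 0, _, _, acc => acc
  | fuel + 1, i, j, (ax, ay) =>
      if i = 0 ∧ j = 0 then (ax, ay)
      else
        let gd := fun (a b : Nat) => (opt.getD a []).getD b 0
        if 0 < i ∧ 0 < j ∧
            gd i j = gd (i-1) (j-1) + pvCost (cs1.getD (i-1) 'A') (cs2.getD (j-1) 'A') then
          pvTbA cs1 cs2 opt fuel (i-1) (j-1)
            (cs1.getD (i-1) 'A' :: ax, cs2.getD (j-1) 'A' :: ay)
        else if 0 < j ∧ gd i j = gd i (j-1) + 30 then
          pvTbA cs1 cs2 opt fuel i (j-1) ('_' :: ax, cs2.getD (j-1) 'A' :: ay)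
        else if 0 < i ∧ gd i j = gd (i-1) j + 30 then
          pvTbA cs1 cs2 opt fuel (i-1) j (cs1.getD (i-1) 'A' :: ax, '_' :: ay)
        else
          pvTbA cs1 cs2 opt fuel i j (ax, ay)   -- Python would loop forever here; never reached on a real table

def basic_solution (sequence1 : String) (sequence2 : String) : Int × String × String :=
  let cs1 := sequence1.toList
  let cs2 := sequence2.toList
  let m := cs1.length
  let n := cs2.length
  let opt := pvOptA cs1 cs2
  let r := pvTbA cs1 cs2 opt (m + n) m n ([], [])
  ((opt.getD m []).getD n 0, String.mk r.1, String.mk r.2)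

-- ===== PORT B =====
-- a cell of B's rolling row: (score, xchain, ychain); the Python cons cells
-- (char, tail) with None as the empty chain are exactly Lean lists
-- row 0: the 'for j in range(1, n+1)' loop building the boundary cells
def pvRow0B : List Char → (Int × List Char × List Char) → List (Int × List Char × List Char)
  | [], _ => []
  | c :: rest, (s, x, y) =>
      let cell := (s + 30, '_' :: x, c :: y)
      cell :: pvRow0B rest cell

-- inner loop of B's forward pass: remaining chars of sequence2, the cell just
-- written to the left, and the previous row from column j-1 on
def pvRowB (c1 : Char) : List Char → (Int × List Char × List Char) →
    List (Int × List Char × List Char) → List (Int × List Char × List Char)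
  | c2 :: rest, left, pd :: pu :: pt =>
      let d := pd.1 + pvCost c1 c2
      let u := pu.1 + 30
      let l := left.1 + 30
      let v := min d (min u l)
      let cell := if v = d then (v, c1 :: pd.2.1, c2 :: pd.2.2)
                  else if v = l then (v, '_' :: left.2.1, c2 :: left.2.2)
                  else (v, c1 :: pu.2.1, '_' :: pu.2.2)
      cell :: pvRowB c1 rest cell (pu :: pt)
  | _, _, _ => []

-- outer loop: replaces the rolling row once per character of sequence1 and
-- returns the final row (only one row is ever kept)
def pvRowsB (cs2 : List Char) : List Char → List (Int × List Char × List Char) →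
    List (Int × List Char × List Char)
  | [], prev => prev
  | c1 :: rest, prev =>
      let head := match prev with
        | p0 :: _ => (p0.1 + 30, c1 :: p0.2.1, '_' :: p0.2.2)
        | [] => (0, ([] : List Char), ([] : List Char))   -- unreachable: the row is never empty
      pvRowsB cs2 rest (head :: pvRowB c1 cs2 head prev)

def basic_solution_alt (sequence1 : String) (sequence2 : String) : Int × String × String :=
  let cs1 := sequence1.toList
  let cs2 := sequence2.toList
  let n := cs2.length
  let row0 := (0, ([] : List Char), ([] : List Char)) :: pvRow0B cs2 (0, [], [])
  let row := pvRowsB cs2 cs1 row0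
  let cell := row.getD n (0, [], [])
  -- the Python while-loops copy each chain into a list (the chain is already a
  -- Lean list, so the copy is the identity), then join reversed
  (cell.1, String.mk cell.2.1.reverse, String.mk cell.2.2.reverse)

-- ===== PRECONDITION & SPEC =====
-- Pre_ admits exactly the inputs on which Python A returns: both sequences over
-- the alphabet {'A','C','G','T'}, or one sequence empty (then the letter_to_idx
-- lookups are never reached); on any other input A raises KeyError.
def Pre_basic_solution (sequence1 : String) (sequence2 : String) : Prop :=
  ((sequence1.toList.all (fun c => c = 'A' ∨ c = 'C' ∨ c = 'G' ∨ c = 'T')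
    && sequence2.toList.all (fun c => c = 'A' ∨ c = 'C' ∨ c = 'G' ∨ c = 'T'))
   || sequence1.toList.isEmpty || sequence2.toList.isEmpty) = true
instance (sequence1 : String) (sequence2 : String) : Decidable (Pre_basic_solution sequence1 sequence2) := by
  unfold Pre_basic_solution; infer_instance

def pvWitness_basic_solution : String × String := ("ACGT", "AGT")

def Spec_basic_solution (sequence1 : String) (sequence2 : String) (out : Int × String × String) : Prop := out = basic_solution_alt sequence1 sequence2
instance (sequence1 : String) (sequence2 : String) (out : Int × String × String) : Decidable (Spec_basic_solution sequence1 sequence2 out) := by unfold Spec_basic_solution; infer_instance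

-- ===== CLAIM (what is proved, stated in full; the proofs are below) =====
def Claim_equal_basic_solution : Prop := ∀ (sequence1 : String) (sequence2 : String), Dom_basic_solution sequence1 sequence2 → Pre_basic_solution sequence1 sequence2 → Spec_basic_solution sequence1 sequence2 (basic_solution sequence1 sequence2)

-- ===== LEMMAS AND PROOFS =====

-- the DP recurrence as an indexed function (ghost spec used only in proofs)
def optF (cs1 cs2 : List Char) : Nat → Nat → Int
  | 0, j => (j : Int) * 30
  | i + 1, 0 => ((i : Int) + 1) * 30
  | i + 1, j + 1 =>
      min (optF cs1 cs2 i j + pvCost (cs1.getD i 'A') (cs2.getD j 'A'))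
          (min (optF cs1 cs2 i (j + 1) + 30) (optF cs1 cs2 (i + 1) j + 30))
  termination_by i j => (i, j)

-- the alignment chains of the greedy (diag > left > up) optimal path, most
-- recent move first (ghost spec)
def pathF (cs1 cs2 : List Char) : Nat → Nat → List Char × List Char
  | 0, 0 => ([], [])
  | 0, j + 1 => ('_' :: (pathF cs1 cs2 0 j).1, cs2.getD j 'A' :: (pathF cs1 cs2 0 j).2)
  | i + 1, 0 => (cs1.getD i 'A' :: (pathF cs1 cs2 i 0).1, '_' :: (pathF cs1 cs2 i 0).2)
  | i + 1, j + 1 =>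
      if optF cs1 cs2 (i + 1) (j + 1) =
          optF cs1 cs2 i j + pvCost (cs1.getD i 'A') (cs2.getD j 'A') then
        (cs1.getD i 'A' :: (pathF cs1 cs2 i j).1, cs2.getD j 'A' :: (pathF cs1 cs2 i j).2)
      else if optF cs1 cs2 (i + 1) (j + 1) = optF cs1 cs2 (i + 1) j + 30 then
        ('_' :: (pathF cs1 cs2 (i + 1) j).1, cs2.getD j 'A' :: (pathF cs1 cs2 (i + 1) j).2)
      else
        (cs1.getD i 'A' :: (pathF cs1 cs2 i (j + 1)).1, '_' :: (pathF cs1 cs2 i (j + 1)).2)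
  termination_by i j => (i, j)

theorem optF_col0 (cs1 cs2 : List Char) (i : Nat) :
    optF cs1 cs2 i 0 = (i : Int) * 30 := by
  cases i with
  | zero => rw [optF]
  | succ i => rw [optF]; push_cast; ring

-- ===== A-side table characterisation =====

-- cells (i, j), …, (i, j+k-1) of row i of A's score table as given by the spec
def rowGA (cs1 cs2 : List Char) (i : Nat) : Nat → Nat → List Int
  | _, 0 => []
  | j, k + 1 => optF cs1 cs2 i j :: rowGA cs1 cs2 i (j + 1) k

-- rows i, …, i+k-1 of A's full table
def colGA (cs1 cs2 : List Char) : Nat → Nat → List (List Int)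
  | _, 0 => []
  | i, k + 1 => rowGA cs1 cs2 i 0 (cs2.length + 1) :: colGA cs1 cs2 (i + 1) k

theorem rowGA_zero (cs1 cs2 : List Char) :
    ∀ (k j : Nat), rowGA cs1 cs2 0 j k = (List.range' j k).map (fun y => (y : Int) * 30) := by
  intro k
  induction k with
  | zero => intro j; simp [rowGA]
  | succ k ih => intro j; simp [rowGA, List.range'_succ, ih, optF]

theorem rowA_eq (cs1 cs2 : List Char) (i : Nat) :
    ∀ (t : List Char) (j : Nat), cs2.drop j = t →
      pvRowA (cs1.getD i 'A') t (optF cs1 cs2 (i + 1) j) (rowGA cs1 cs2 i j (t.length + 1)) =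
        rowGA cs1 cs2 (i + 1) (j + 1) t.length := by
  intro t
  induction t with
  | nil => intro j _; simp [pvRowA, rowGA]
  | cons c2 rest ih =>
      intro j hdrop
      have hc2 : cs2.getD j 'A' = c2 := by
        have h : (cs2.drop j)[0]? = cs2[j + 0]? := List.getElem?_drop
        rw [hdrop] at h
        simp only [List.getElem?_cons_zero, Nat.add_zero] at h
        simp [List.getD, ← h]
      have hrest : cs2.drop (j + 1) = rest := by
        have : (cs2.drop j).drop 1 = rest := by rw [hdrop]; simp
        simpa [List.drop_drop, Nat.add_comm] using this
      have hv : min (optF cs1 cs2 i j + pvCost (cs1.getD i 'A') c2)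
          (min (optF cs1 cs2 i (j + 1) + 30) (optF cs1 cs2 (i + 1) j + 30)) =
          optF cs1 cs2 (i + 1) (j + 1) := by
        rw [optF, hc2]
      show pvRowA (cs1.getD i 'A') (c2 :: rest) (optF cs1 cs2 (i + 1) j)
          (rowGA cs1 cs2 i j (rest.length + 1 + 1)) = rowGA cs1 cs2 (i + 1) (j + 1) (rest.length + 1)
      rw [rowGA, rowGA, pvRowA, rowGA, hv]
      congr 1
      exact ih (j + 1) hrest

theorem rowsA_eq (cs1 cs2 : List Char) :
    ∀ (t1 : List Char) (i : Nat), cs1.drop i = t1 →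
      pvRowsA cs2 t1 (rowGA cs1 cs2 i 0 (cs2.length + 1)) ((i : Int) + 1) =
        colGA cs1 cs2 (i + 1) t1.length := by
  intro t1
  induction t1 with
  | nil => intro i _; simp [pvRowsA, colGA]
  | cons c1 rest ih =>
      intro i hdrop
      have hc1 : cs1.getD i 'A' = c1 := by
        have h : (cs1.drop i)[0]? = cs1[i + 0]? := List.getElem?_drop
        rw [hdrop] at h
        simp only [List.getElem?_cons_zero, Nat.add_zero] at h
        simp [List.getD, ← h]
      have hrest : cs1.drop (i + 1) = rest := by
        have : (cs1.drop i).drop 1 = rest := by rw [hdrop]; simp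
        simpa [List.drop_drop, Nat.add_comm] using this
      rw [pvRowsA]
      have hbody : pvRowA c1 cs2 (((i : Int) + 1) * 30) (rowGA cs1 cs2 i 0 (cs2.length + 1)) =
          rowGA cs1 cs2 (i + 1) 1 cs2.length := by
        have hleft : ((i : Int) + 1) * 30 = optF cs1 cs2 (i + 1) 0 := by rw [optF]
        rw [hleft, ← hc1]
        exact rowA_eq cs1 cs2 i cs2 0 (by simp)
      have h1 : rowGA cs1 cs2 (i + 1) 0 (cs2.length + 1) =
          (((i : Int) + 1) * 30) :: rowGA cs1 cs2 (i + 1) 1 cs2.length := by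
        rw [rowGA]
        have h2 : optF cs1 cs2 (i + 1) 0 = ((i : Int) + 1) * 30 := by rw [optF]
        rw [h2]
      simp only [List.length_cons]
      rw [colGA, hbody, h1]
      have h3 := ih (i + 1) hrest
      have hcast : ((i : Int) + 1 + 1) = (((i + 1 : Nat) : Int) + 1) := by push_cast; ring
      rw [hcast, ← h1, h3]

theorem tblA_eq (cs1 cs2 : List Char) :
    pvOptA cs1 cs2 = colGA cs1 cs2 0 (cs1.length + 1) := by
  have h0 : (List.range (cs2.length + 1)).map (fun y => (y : Int) * 30) =
      rowGA cs1 cs2 0 0 (cs2.length + 1) := by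
    rw [rowGA_zero, List.range_eq_range']
  show ((List.range (cs2.length + 1)).map (fun y => (y : Int) * 30)) ::
      pvRowsA cs2 cs1 ((List.range (cs2.length + 1)).map (fun y => (y : Int) * 30)) 1 =
      colGA cs1 cs2 0 (cs1.length + 1)
  rw [colGA.eq_def, h0]
  simp only [List.cons.injEq]
  refine ⟨trivial, ?_⟩
  have := rowsA_eq cs1 cs2 cs1 0 (by simp)
  simpa using this

theorem rowGA_getD (cs1 cs2 : List Char) (i : Nat) :
    ∀ (k j0 j : Nat), j < k →
      (rowGA cs1 cs2 i j0 k).getD j 0 = optF cs1 cs2 i (j0 + j) := by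
  intro k
  induction k with
  | zero => intro j0 j h; omega
  | succ k ih =>
      intro j0 j h
      rw [rowGA]
      cases j with
      | zero => simp
      | succ j =>
          have := ih (j0 + 1) j (by omega)
          simpa [Nat.add_assoc, Nat.add_comm 1 j] using this

theorem colGA_getD (cs1 cs2 : List Char) :
    ∀ (k i0 i : Nat), i < k →
      (colGA cs1 cs2 i0 k).getD i [] = rowGA cs1 cs2 (i0 + i) 0 (cs2.length + 1) := by
  intro k
  induction k with
  | zero => intro i0 i h; omega
  | succ k ih =>
      intro i0 i h
      rw [colGA]
      cases i with
      | zero => simp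
      | succ i =>
          have := ih (i0 + 1) i (by omega)
          simpa [Nat.add_assoc, Nat.add_comm 1 i] using this

theorem cellA (cs1 cs2 : List Char) (i j : Nat) (hi : i ≤ cs1.length) (hj : j ≤ cs2.length) :
    ((pvOptA cs1 cs2).getD i []).getD j 0 = optF cs1 cs2 i j := by
  rw [tblA_eq, colGA_getD cs1 cs2 (cs1.length + 1) 0 i (by omega)]
  simpa using rowGA_getD cs1 cs2 i (cs2.length + 1) 0 j (by omega)

-- ===== B-side rolling-row characterisation =====

-- cells (i, j), …, (i, j+k-1) of B's rolling row as given by the spec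
def rowGB (cs1 cs2 : List Char) (i : Nat) : Nat → Nat → List (Int × List Char × List Char)
  | _, 0 => []
  | j, k + 1 => (optF cs1 cs2 i j, pathF cs1 cs2 i j) :: rowGB cs1 cs2 i (j + 1) k

theorem row0B_eq (cs1 cs2 : List Char) :
    ∀ (t : List Char) (j : Nat), cs2.drop j = t →
      pvRow0B t (optF cs1 cs2 0 j, pathF cs1 cs2 0 j) = rowGB cs1 cs2 0 (j + 1) t.length := by
  intro t
  induction t with
  | nil => intro j _; simp [pvRow0B, rowGB]
  | cons c rest ih =>
      intro j hdrop
      have hc : cs2.getD j 'A' = c := by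
        have h : (cs2.drop j)[0]? = cs2[j + 0]? := List.getElem?_drop
        rw [hdrop] at h
        simp only [List.getElem?_cons_zero, Nat.add_zero] at h
        simp [List.getD, ← h]
      have hrest : cs2.drop (j + 1) = rest := by
        have : (cs2.drop j).drop 1 = rest := by rw [hdrop]; simp
        simpa [List.drop_drop, Nat.add_comm] using this
      have hcell : (optF cs1 cs2 0 j + 30, '_' :: (pathF cs1 cs2 0 j).1, c :: (pathF cs1 cs2 0 j).2) =
          (optF cs1 cs2 0 (j + 1), pathF cs1 cs2 0 (j + 1)) := by
        rw [pathF, hc]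
        have : optF cs1 cs2 0 j + 30 = optF cs1 cs2 0 (j + 1) := by
          rw [optF, optF]; push_cast; ring
        rw [this]
      show pvRow0B (c :: rest) (optF cs1 cs2 0 j, pathF cs1 cs2 0 j) =
      rowGB cs1 cs2 0 (j + 1) (rest.length + 1)
      rw [pvRow0B, rowGB, hcell]
      congr 1
      exact ih (j + 1) hrest

theorem rowB_eq (cs1 cs2 : List Char) (i : Nat) :
    ∀ (t : List Char) (j : Nat), cs2.drop j = t →
      pvRowB (cs1.getD i 'A') t (optF cs1 cs2 (i + 1) j, pathF cs1 cs2 (i + 1) j)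
          (rowGB cs1 cs2 i j (t.length + 1)) =
        rowGB cs1 cs2 (i + 1) (j + 1) t.length := by
  intro t
  induction t with
  | nil => intro j _; simp [pvRowB, rowGB]
  | cons c2 rest ih =>
      intro j hdrop
      have hc2 : cs2.getD j 'A' = c2 := by
        have h : (cs2.drop j)[0]? = cs2[j + 0]? := List.getElem?_drop
        rw [hdrop] at h
        simp only [List.getElem?_cons_zero, Nat.add_zero] at h
        simp [List.getD, ← h]
      have hrest : cs2.drop (j + 1) = rest := by
        have : (cs2.drop j).drop 1 = rest := by rw [hdrop]; simp
        simpa [List.drop_drop, Nat.add_comm] using this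
      have hv : min (optF cs1 cs2 i j + pvCost (cs1.getD i 'A') c2)
          (min (optF cs1 cs2 i (j + 1) + 30) (optF cs1 cs2 (i + 1) j + 30)) =
          optF cs1 cs2 (i + 1) (j + 1) := by
        rw [optF, hc2]
      have hcell :
          (if optF cs1 cs2 (i + 1) (j + 1) = optF cs1 cs2 i j + pvCost (cs1.getD i 'A') c2 then
            (optF cs1 cs2 (i + 1) (j + 1), cs1.getD i 'A' :: (pathF cs1 cs2 i j).1,
              c2 :: (pathF cs1 cs2 i j).2)
          else if optF cs1 cs2 (i + 1) (j + 1) = optF cs1 cs2 (i + 1) j + 30 then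
            (optF cs1 cs2 (i + 1) (j + 1), '_' :: (pathF cs1 cs2 (i + 1) j).1,
              c2 :: (pathF cs1 cs2 (i + 1) j).2)
          else
            (optF cs1 cs2 (i + 1) (j + 1), cs1.getD i 'A' :: (pathF cs1 cs2 i (j + 1)).1,
              '_' :: (pathF cs1 cs2 i (j + 1)).2)) =
          (optF cs1 cs2 (i + 1) (j + 1), pathF cs1 cs2 (i + 1) (j + 1)) := by
        rw [pathF, hc2]
        split_ifs <;> rfl
      show pvRowB (cs1.getD i 'A') (c2 :: rest)
          (optF cs1 cs2 (i + 1) j, pathF cs1 cs2 (i + 1) j)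
          (rowGB cs1 cs2 i j (rest.length + 1 + 1)) = rowGB cs1 cs2 (i + 1) (j + 1) (rest.length + 1)
      rw [rowGB, rowGB, pvRowB, rowGB]
      simp only [hv]
      rw [hcell]
      congr 1
      exact ih (j + 1) hrest

theorem rowsB_eq (cs1 cs2 : List Char) :
    ∀ (t1 : List Char) (i : Nat), cs1.drop i = t1 →
      pvRowsB cs2 t1 (rowGB cs1 cs2 i 0 (cs2.length + 1)) =
        rowGB cs1 cs2 (i + t1.length) 0 (cs2.length + 1) := by
  intro t1
  induction t1 with
  | nil => intro i _; simp [pvRowsB]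
  | cons c1 rest ih =>
      intro i hdrop
      have hc1 : cs1.getD i 'A' = c1 := by
        have h : (cs1.drop i)[0]? = cs1[i + 0]? := List.getElem?_drop
        rw [hdrop] at h
        simp only [List.getElem?_cons_zero, Nat.add_zero] at h
        simp [List.getD, ← h]
      have hrest : cs1.drop (i + 1) = rest := by
        have : (cs1.drop i).drop 1 = rest := by rw [hdrop]; simp
        simpa [List.drop_drop, Nat.add_comm] using this
      have hhead : (optF cs1 cs2 i 0 + 30, c1 :: (pathF cs1 cs2 i 0).1, '_' :: (pathF cs1 cs2 i 0).2) =
          (optF cs1 cs2 (i + 1) 0, pathF cs1 cs2 (i + 1) 0) := by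
        rw [pathF, hc1]
        have : optF cs1 cs2 i 0 + 30 = optF cs1 cs2 (i + 1) 0 := by
          rw [optF_col0, optF_col0]; push_cast; ring
        rw [this]
      have hexp : rowGB cs1 cs2 i 0 (cs2.length + 1) =
          (optF cs1 cs2 i 0, pathF cs1 cs2 i 0) :: rowGB cs1 cs2 i 1 cs2.length := by
        rw [rowGB]
      rw [hexp, pvRowsB]
      have hbody : pvRowB c1 cs2 (optF cs1 cs2 i 0 + 30, c1 :: (pathF cs1 cs2 i 0).1, '_' :: (pathF cs1 cs2 i 0).2)
          ((optF cs1 cs2 i 0, pathF cs1 cs2 i 0) :: rowGB cs1 cs2 i 1 cs2.length) =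
          rowGB cs1 cs2 (i + 1) 1 cs2.length := by
        rw [hhead, ← hc1, ← hexp]
        exact rowB_eq cs1 cs2 i cs2 0 (by simp)
      rw [hbody, hhead]
      have h1 : (optF cs1 cs2 (i + 1) 0, pathF cs1 cs2 (i + 1) 0) :: rowGB cs1 cs2 (i + 1) 1 cs2.length =
          rowGB cs1 cs2 (i + 1) 0 (cs2.length + 1) := by
        rw [rowGB]
      rw [h1]
      have := ih (i + 1) hrest
      simp only [List.length_cons]
      rw [this]
      congr 1
      omega

theorem rowGB_getD (cs1 cs2 : List Char) (i : Nat) :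
    ∀ (k j0 j : Nat), j < k →
      (rowGB cs1 cs2 i j0 k).getD j (0, [], []) =
        (optF cs1 cs2 i (j0 + j), pathF cs1 cs2 i (j0 + j)) := by
  intro k
  induction k with
  | zero => intro j0 j h; omega
  | succ k ih =>
      intro j0 j h
      rw [rowGB]
      cases j with
      | zero => simp
      | succ j =>
          have := ih (j0 + 1) j (by omega)
          simpa [Nat.add_assoc, Nat.add_comm 1 j] using this

-- optF equals one of its three candidates at interior cells
theorem optF_cases (cs1 cs2 : List Char) (i j : Nat) :
    optF cs1 cs2 (i + 1) (j + 1) = optF cs1 cs2 i j + pvCost (cs1.getD i 'A') (cs2.getD j 'A') ∨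
    optF cs1 cs2 (i + 1) (j + 1) = optF cs1 cs2 i (j + 1) + 30 ∨
    optF cs1 cs2 (i + 1) (j + 1) = optF cs1 cs2 (i + 1) j + 30 := by
  rw [optF]
  rcases le_total (optF cs1 cs2 i j + pvCost (cs1.getD i 'A') (cs2.getD j 'A'))
      (min (optF cs1 cs2 i (j + 1) + 30) (optF cs1 cs2 (i + 1) j + 30)) with h | h
  · left; exact min_eq_left h
  · rw [min_eq_right h]
    rcases le_total (optF cs1 cs2 i (j + 1) + 30) (optF cs1 cs2 (i + 1) j + 30) with h2 | h2
    · right; left; exact min_eq_left h2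
    · right; right; exact min_eq_right h2

-- A's traceback from (i, j) prepends exactly the greedy path chains pathF i j
theorem tbA_path (cs1 cs2 : List Char) :
    ∀ (fuel i j : Nat) (ax ay : List Char), i + j ≤ fuel → i ≤ cs1.length → j ≤ cs2.length →
      pvTbA cs1 cs2 (pvOptA cs1 cs2) fuel i j (ax, ay) =
        ((pathF cs1 cs2 i j).1.reverse ++ ax, (pathF cs1 cs2 i j).2.reverse ++ ay) := by
  intro fuel
  induction fuel with
  | zero =>
      intro i j ax ay hf _ _
      have hi : i = 0 := by omega
      have hj : j = 0 := by omega
      subst hi; subst hj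
      simp [pvTbA, pathF]
  | succ fuel ih =>
      intro i j ax ay hf hi hj
      rw [pvTbA]
      by_cases h00 : i = 0 ∧ j = 0
      · obtain ⟨h1, h2⟩ := h00; subst h1; subst h2
        simp [pathF]
      · simp only [if_neg h00]
        have hAij := cellA cs1 cs2 i j hi hj
        match i, j with
        | 0, 0 => exact absurd ⟨rfl, rfl⟩ h00
        | 0, j + 1 =>
            have hc1 : ¬ (0 < 0 ∧ 0 < j + 1 ∧ ((pvOptA cs1 cs2).getD 0 []).getD (j+1) 0 =
                ((pvOptA cs1 cs2).getD (0-1) []).getD (j+1-1) 0 +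
                pvCost (cs1.getD (0-1) 'A') (cs2.getD (j+1-1) 'A')) := by
              rintro ⟨h, _⟩; exact absurd h (by omega)
            rw [if_neg hc1]
            have hc2 : (0 < j + 1 ∧ ((pvOptA cs1 cs2).getD 0 []).getD (j+1) 0 =
                ((pvOptA cs1 cs2).getD 0 []).getD (j+1-1) 0 + 30) := by
              refine ⟨by omega, ?_⟩
              rw [hAij, cellA cs1 cs2 0 (j+1-1) hi (by omega)]
              show optF cs1 cs2 0 (j + 1) = optF cs1 cs2 0 j + 30
              rw [optF, optF]; push_cast; ring
            rw [if_pos hc2]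
            have := ih 0 j ('_' :: ax) (cs2.getD j 'A' :: ay) (by omega) hi (by omega)
            simp only [Nat.add_sub_cancel] at this ⊢
            rw [this, pathF]
            simp
        | i + 1, 0 =>
            have hc1 : ¬ (0 < i + 1 ∧ 0 < 0 ∧ ((pvOptA cs1 cs2).getD (i+1) []).getD 0 0 =
                ((pvOptA cs1 cs2).getD (i+1-1) []).getD (0-1) 0 +
                pvCost (cs1.getD (i+1-1) 'A') (cs2.getD (0-1) 'A')) := by
              rintro ⟨_, h, _⟩; exact absurd h (by omega)
            rw [if_neg hc1]
            have hc2 : ¬ (0 < 0 ∧ ((pvOptA cs1 cs2).getD (i+1) []).getD 0 0 =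
                ((pvOptA cs1 cs2).getD (i+1) []).getD (0-1) 0 + 30) := by
              rintro ⟨h, _⟩; exact absurd h (by omega)
            rw [if_neg hc2]
            have hc3 : (0 < i + 1 ∧ ((pvOptA cs1 cs2).getD (i+1) []).getD 0 0 =
                ((pvOptA cs1 cs2).getD (i+1-1) []).getD 0 0 + 30) := by
              refine ⟨by omega, ?_⟩
              rw [hAij, cellA cs1 cs2 (i+1-1) 0 (by omega) hj]
              show optF cs1 cs2 (i + 1) 0 = optF cs1 cs2 i 0 + 30
              rw [optF_col0, optF_col0]; push_cast; ring
            rw [if_pos hc3]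
            have := ih i 0 (cs1.getD i 'A' :: ax) ('_' :: ay) (by omega) (by omega) hj
            simp only [Nat.add_sub_cancel] at this ⊢
            rw [this, pathF]
            simp
        | i + 1, j + 1 =>
            have hAd := cellA cs1 cs2 i j (by omega) (by omega)
            have hAl := cellA cs1 cs2 (i + 1) j hi (by omega)
            have hAu := cellA cs1 cs2 i (j + 1) (by omega) hj
            simp only [Nat.add_sub_cancel]
            rw [hAij, hAd, hAl, hAu]
            by_cases hD : optF cs1 cs2 (i + 1) (j + 1) =
                optF cs1 cs2 i j + pvCost (cs1.getD i 'A') (cs2.getD j 'A')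
            · rw [if_pos ⟨Nat.succ_pos i, Nat.succ_pos j, hD⟩]
              have := ih i j (cs1.getD i 'A' :: ax) (cs2.getD j 'A' :: ay) (by omega) (by omega) (by omega)
              rw [this, pathF, if_pos hD]
              simp
            · rw [if_neg (by rintro ⟨_, _, h⟩; exact hD h)]
              by_cases hL : optF cs1 cs2 (i + 1) (j + 1) = optF cs1 cs2 (i + 1) j + 30
              · rw [if_pos ⟨Nat.succ_pos j, hL⟩]
                have := ih (i + 1) j ('_' :: ax) (cs2.getD j 'A' :: ay) (by omega) hi (by omega)
                rw [this, pathF, if_neg hD, if_pos hL]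
                simp
              · rw [if_neg (by rintro ⟨_, h⟩; exact hL h)]
                have hU : optF cs1 cs2 (i + 1) (j + 1) = optF cs1 cs2 i (j + 1) + 30 := by
                  rcases optF_cases cs1 cs2 i j with h | h | h
                  · exact absurd h hD
                  · exact h
                  · exact absurd h hL
                rw [if_pos ⟨Nat.succ_pos i, hU⟩]
                have := ih i (j + 1) (cs1.getD i 'A' :: ax) ('_' :: ay) (by omega) (by omega) hj
                rw [this, pathF, if_neg hD, if_neg hL]
                simp

-- ===== VERDICT (by name: the statement is the Claim_ definition above) =====
theorem basic_solution_spec : Claim_equal_basic_solution := by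
  intro s1 s2 _ _
  show basic_solution s1 s2 = basic_solution_alt s1 s2
  unfold basic_solution basic_solution_alt
  dsimp only
  have hA := cellA s1.toList s2.toList s1.toList.length s2.toList.length le_rfl le_rfl
  have ht := tbA_path s1.toList s2.toList (s1.toList.length + s2.toList.length)
      s1.toList.length s2.toList.length [] [] le_rfl le_rfl le_rfl
  have hrow0 : (0, ([] : List Char), ([] : List Char)) :: pvRow0B s2.toList (0, [], []) =
      rowGB s1.toList s2.toList 0 0 (s2.toList.length + 1) := by
    have h0 : ((0 : Int), ([] : List Char), ([] : List Char)) =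
        (optF s1.toList s2.toList 0 0, pathF s1.toList s2.toList 0 0) := by
      rw [optF, pathF]; norm_num
    rw [rowGB, ← h0]
    congr 1
    rw [h0]
    simpa using row0B_eq s1.toList s2.toList s2.toList 0 (by simp)
  rw [hrow0]
  have hrows := rowsB_eq s1.toList s2.toList s1.toList 0 (by simp)
  simp only [Nat.zero_add] at hrows
  rw [hrows, rowGB_getD s1.toList s2.toList s1.toList.length (s2.toList.length + 1) 0
      s2.toList.length (by omega)]
  rw [hA, ht]
  simp
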